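-- pv_equiv track=rewrite | github.com/LotharCorvega/aoc | 2024/day12/snd.py | merges
-- ===== SOURCE A (Python) =====
-- patterns = {
--     (True, True, False, False),
--     (False, False, True, True),
--     (True, False, True, False),
--     (False, True, False, True)
-- }
--
-- def merges(p):
--     min_i = min(map(lambda x: x[0], p)) - 1
--     max_i = max(map(lambda x: x[0], p)) + 1
--     min_j = min(map(lambda x: x[1], p)) - 1
--     max_j = max(map(lambda x: x[1], p)) + 1
--
--     merges = 0
--
--     for i in range(min_i, max_i):
--         for j in range(min_j, max_j):
--             x = (
--                 (i + 0, j + 0) in p,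
--                 (i + 0, j + 1) in p,
--                 (i + 1, j + 0) in p,
--                 (i + 1, j + 1) in p
--             )
--
--             merges += x in patterns
--
--     return merges
-- ===== SOURCE B (Python) =====
-- patterns = {
--     (True, True, False, False),
--     (False, False, True, True),
--     (True, False, True, False),
--     (False, True, False, True)
-- }
--
-- def merges(p):
--     # Only 2x2 windows whose top-left corner is adjacent to some point can match
--     # a pattern (every pattern contains a True), so enumerate those windows only.
--     pts = set(p)
--     seen = set()
--     for a, b in p:
--         seen.add((a, b))
--         seen.add((a - 1, b))
--         seen.add((a, b - 1))
--         seen.add((a - 1, b - 1))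
--     total = 0
--     for i, j in seen:
--         x = ((i, j) in pts, (i, j + 1) in pts, (i + 1, j) in pts, (i + 1, j + 1) in pts)
--         total += x in patterns
--     return total
-- ===== Notes on version B (the rewrite author's own statement) =====
-- stated objective: faster
-- what changed: B enumerates only the 2x2 windows whose top-left corner is adjacent to some point of p (deduplicated via a set) and uses a set for membership, instead of scanning every cell of the enlarged bounding box with list membership tests.
import Mathlib
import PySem

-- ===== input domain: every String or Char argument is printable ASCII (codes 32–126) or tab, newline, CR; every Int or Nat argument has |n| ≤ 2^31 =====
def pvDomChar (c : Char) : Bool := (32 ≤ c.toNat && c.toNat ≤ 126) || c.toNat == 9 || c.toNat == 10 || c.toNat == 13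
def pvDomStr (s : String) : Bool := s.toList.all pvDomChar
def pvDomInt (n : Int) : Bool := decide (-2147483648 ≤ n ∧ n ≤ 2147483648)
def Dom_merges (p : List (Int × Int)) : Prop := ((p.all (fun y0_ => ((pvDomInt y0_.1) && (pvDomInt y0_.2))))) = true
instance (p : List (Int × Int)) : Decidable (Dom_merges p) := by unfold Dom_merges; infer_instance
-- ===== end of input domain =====

-- B enumerates only the 2x2 windows whose top-left corner is adjacent to some point of p
-- (deduplicated via a set) instead of scanning the whole bounding box: faster.

-- module-level constant 'patterns' (a set of 4-tuples of bool), used by both ports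
def patternsList : List (Bool × Bool × Bool × Bool) :=
  [(true, true, false, false),
   (false, false, true, true),
   (true, false, true, false),
   (false, true, false, true)]

-- ===== PORT A =====
-- Python min()/max() raise on empty p; Pre_merges excludes that, so the `.getD 0` is never reached.
def merges (p : List (Int × Int)) : Int :=
  let min_i := (PySem.List.min? (p.map (fun x => x.1)) (fun y => y)).getD 0 - 1
  let max_i := (PySem.List.max? (p.map (fun x => x.1)) (fun y => y)).getD 0 + 1
  let min_j := (PySem.List.min? (p.map (fun x => x.2)) (fun y => y)).getD 0 - 1
  let max_j := (PySem.List.max? (p.map (fun x => x.2)) (fun y => y)).getD 0 + 1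
  (PySem.List.pyRange min_i max_i 1).foldl (fun m i =>
    (PySem.List.pyRange min_j max_j 1).foldl (fun m j =>
      m + (if patternsList.contains
             (p.contains (i + 0, j + 0), p.contains (i + 0, j + 1),
              p.contains (i + 1, j + 0), p.contains (i + 1, j + 1)) then 1 else 0)) m) 0

-- ===== PORT B =====
-- body of B's first loop: the four seen.add(…) calls for one point q
def seenStep (s : PySem.Set (Int × Int)) (q : Int × Int) : PySem.Set (Int × Int) :=
  PySem.Set.add (PySem.Set.add (PySem.Set.add (PySem.Set.add s
    (q.1, q.2)) (q.1 - 1, q.2)) (q.1, q.2 - 1)) (q.1 - 1, q.2 - 1)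

def merges_alt (p : List (Int × Int)) : Int :=
  let pts : PySem.Set (Int × Int) := PySem.Set.ofList p
  let seen : PySem.Set (Int × Int) := p.foldl seenStep PySem.Set.empty
  seen.foldl (fun m q =>
    m + (if patternsList.contains
           (PySem.Set.contains pts (q.1, q.2), PySem.Set.contains pts (q.1, q.2 + 1),
            PySem.Set.contains pts (q.1 + 1, q.2), PySem.Set.contains pts (q.1 + 1, q.2 + 1))
         then 1 else 0)) 0

-- ===== PRECONDITION & SPEC =====
-- Pre_ excludes exactly the empty list, on which Python's min() raises ValueError.
def Pre_merges (p : List (Int × Int)) : Prop := p ≠ []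
instance (p : List (Int × Int)) : Decidable (Pre_merges p) := by unfold Pre_merges; infer_instance
def pvWitness_merges : (List (Int × Int)) := [(0, 0), (0, 1)]

def Spec_merges (p : List (Int × Int)) (out : Int) : Prop := out = merges_alt p
instance (p : List (Int × Int)) (out : Int) : Decidable (Spec_merges p out) := by unfold Spec_merges; infer_instance

-- ===== CLAIM (what is proved, stated in full; the proofs are below) =====
def Claim_equal_merges : Prop := ∀ (p : List (Int × Int)), Dom_merges p → Pre_merges p → Spec_merges p (merges p)

-- ===== LEMMAS AND PROOFS =====

-- A's nested counting loop is countP over the product list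
theorem nested_foldl_count (l1 l2 : List Int) (f : Int → Int → Bool) (m : Int) :
    l1.foldl (fun m i => l2.foldl (fun m j => m + (if f i j then 1 else 0)) m) m
      = m + (((l1 ×ˢ l2).countP (fun q => f q.1 q.2) : Nat) : Int) := by
  induction l1 generalizing m with
  | nil => simp [SProd.sprod, List.product]
  | cons a t ih =>
    rw [List.foldl_cons, ih, PySem.List.foldl_add, PySem.List.sum_map_ite_one_zero]
    have hc : (a :: t) ×ˢ l2 = l2.map (Prod.mk a) ++ t ×ˢ l2 := by
      simp [SProd.sprod, List.product]
    rw [hc, List.countP_append, List.countP_map]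
    have he : ((fun q : Int × Int => f q.1 q.2) ∘ Prod.mk a) = f a := rfl
    rw [he]
    push_cast
    ring

-- B's summing loop is countP
theorem foldl_count (l : List (Int × Int)) (f : Int × Int → Bool) (m : Int) :
    l.foldl (fun m q => m + (if f q then 1 else 0)) m = m + ((l.countP f : Nat) : Int) := by
  rw [PySem.List.foldl_add, PySem.List.sum_map_ite_one_zero]

-- two nodup lists that both contain every f-true element have equal countP
theorem countP_eq_of_nodup {α : Type} [DecidableEq α] (l1 l2 : List α) (f : α → Bool)
    (h1 : l1.Nodup) (h2 : l2.Nodup)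
    (m1 : ∀ x, f x = true → x ∈ l1) (m2 : ∀ x, f x = true → x ∈ l2) :
    l1.countP f = l2.countP f := by
  rw [List.countP_eq_length_filter, List.countP_eq_length_filter]
  exact List.Perm.length_eq <| (List.perm_ext_iff_of_nodup (h1.filter f) (h2.filter f)).2
    (fun x => by
      simp only [List.mem_filter]
      constructor
      · rintro ⟨-, hf⟩; exact ⟨m2 x hf, hf⟩
      · rintro ⟨-, hf⟩; exact ⟨m1 x hf, hf⟩)

theorem mem_seenFold (p : List (Int × Int)) (s : PySem.Set (Int × Int)) (q : Int × Int) :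
    q ∈ p.foldl seenStep s ↔ q ∈ s ∨ ∃ ab ∈ p,
      q = ab ∨ q = (ab.1 - 1, ab.2) ∨ q = (ab.1, ab.2 - 1) ∨ q = (ab.1 - 1, ab.2 - 1) := by
  induction p generalizing s with
  | nil => simp
  | cons a t ih =>
    rw [List.foldl_cons, ih]
    simp only [seenStep, PySem.Set.mem_add, List.mem_cons]
    constructor
    · rintro (((((h | h) | h) | h) | h) | ⟨ab, hab, h⟩)
      · exact Or.inl h
      · exact Or.inr ⟨a, Or.inl rfl, Or.inl (by simpa using h)⟩
      · exact Or.inr ⟨a, Or.inl rfl, Or.inr (Or.inl (by simpa using h))⟩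
      · exact Or.inr ⟨a, Or.inl rfl, Or.inr (Or.inr (Or.inl (by simpa using h)))⟩
      · exact Or.inr ⟨a, Or.inl rfl, Or.inr (Or.inr (Or.inr (by simpa using h)))⟩
      · exact Or.inr ⟨ab, Or.inr hab, h⟩
    · rintro (h | ⟨ab, (rfl | hab), h⟩)
      · exact Or.inl (Or.inl (Or.inl (Or.inl (Or.inl h))))
      · rcases h with h | h | h | h
        · exact Or.inl (Or.inl (Or.inl (Or.inl (Or.inr (by simp [h])))))
        · exact Or.inl (Or.inl (Or.inl (Or.inr (by simp [h]))))
        · exact Or.inl (Or.inl (Or.inr (by simp [h])))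
        · exact Or.inl (Or.inr (by simp [h]))
      · exact Or.inr ⟨ab, hab, h⟩

theorem nodup_seenFold (p : List (Int × Int)) (s : PySem.Set (Int × Int)) (hs : s.Nodup) :
    (p.foldl seenStep s).Nodup := by
  induction p generalizing s with
  | nil => exact hs
  | cons a t ih =>
    exact ih _ (PySem.Set.nodup_add _ _ (PySem.Set.nodup_add _ _ (PySem.Set.nodup_add _ _
      (PySem.Set.nodup_add _ _ hs))))

-- the shared 0/1 predicate: "the 2x2 window with top-left (i, j) matches a pattern"
def indP (p : List (Int × Int)) (i j : Int) : Bool :=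
  patternsList.contains (p.contains (i, j), p.contains (i, j + 1),
                         p.contains (i + 1, j), p.contains (i + 1, j + 1))

-- a matching window touches a point of p (every pattern has a true component)
theorem indP_exists (p : List (Int × Int)) (i j : Int) (h : indP p i j = true) :
    ∃ d1 d2 : Int, (d1 = 0 ∨ d1 = 1) ∧ (d2 = 0 ∨ d2 = 1) ∧ (i + d1, j + d2) ∈ p := by
  simp only [indP, patternsList, List.contains_eq_mem, List.mem_cons, List.not_mem_nil,
    or_false, decide_eq_true_eq, Prod.mk.injEq] at h
  rcases h with ⟨h1, -⟩ | ⟨-, -, h3, -⟩ | ⟨h1, -⟩ | ⟨-, h2, -⟩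
  · exact ⟨0, 0, Or.inl rfl, Or.inl rfl, by simpa using h1⟩
  · exact ⟨1, 0, Or.inr rfl, Or.inl rfl, by simpa using h3⟩
  · exact ⟨0, 0, Or.inl rfl, Or.inl rfl, by simpa using h1⟩
  · exact ⟨0, 1, Or.inl rfl, Or.inr rfl, by simpa using h2⟩

-- ===== VERDICT (by name: the statement is the Claim_ definition above) =====
theorem merges_spec : Claim_equal_merges := by
  intro p _ hp
  unfold Spec_merges
  -- the four extrema exist because p ≠ []
  obtain ⟨mi, hmi⟩ : ∃ m, PySem.List.min? (p.map (fun x => x.1)) (fun y => y) = some m := by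
    cases h : PySem.List.min? (p.map (fun x => x.1)) (fun y => y) with
    | none => exact absurd (by simpa using (PySem.List.min?_eq_none_iff _ _).1 h) hp
    | some m => exact ⟨m, rfl⟩
  obtain ⟨Ma, hMa⟩ : ∃ m, PySem.List.max? (p.map (fun x => x.1)) (fun y => y) = some m := by
    cases h : PySem.List.max? (p.map (fun x => x.1)) (fun y => y) with
    | none => exact absurd (by simpa using (PySem.List.max?_eq_none_iff _ _).1 h) hp
    | some m => exact ⟨m, rfl⟩
  obtain ⟨mj, hmj⟩ : ∃ m, PySem.List.min? (p.map (fun x => x.2)) (fun y => y) = some m := by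
    cases h : PySem.List.min? (p.map (fun x => x.2)) (fun y => y) with
    | none => exact absurd (by simpa using (PySem.List.min?_eq_none_iff _ _).1 h) hp
    | some m => exact ⟨m, rfl⟩
  obtain ⟨Mj, hMj⟩ : ∃ m, PySem.List.max? (p.map (fun x => x.2)) (fun y => y) = some m := by
    cases h : PySem.List.max? (p.map (fun x => x.2)) (fun y => y) with
    | none => exact absurd (by simpa using (PySem.List.max?_eq_none_iff _ _).1 h) hp
    | some m => exact ⟨m, rfl⟩
  -- rewrite Set membership tests of B into plain list membership
  have hc : ∀ x, PySem.Set.contains (PySem.Set.ofList p) x = p.contains x := fun x => by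
    simp [List.contains_eq_mem, PySem.Set.mem_ofList]
  simp only [merges, merges_alt, hmi, hMa, hmj, hMj, Option.getD_some, add_zero, hc]
  rw [nested_foldl_count _ _ (fun i j => patternsList.contains
        (p.contains (i, j), p.contains (i, j + 1), p.contains (i + 1, j), p.contains (i + 1, j + 1))),
      foldl_count _ (fun q => patternsList.contains
        (p.contains (q.1, q.2), p.contains (q.1, q.2 + 1),
         p.contains (q.1 + 1, q.2), p.contains (q.1 + 1, q.2 + 1)))]
  congr 1
  norm_cast
  apply countP_eq_of_nodup
  · exact List.Nodup.product (PySem.List.nodup_pyRange_one _ _) (PySem.List.nodup_pyRange_one _ _)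
  · exact nodup_seenFold p _ List.nodup_nil
  · -- every matching window lies in the bounding-box grid
    intro x hx
    obtain ⟨d1, d2, hd1, hd2, hmem⟩ := indP_exists p x.1 x.2 hx
    have hx1 : x.1 + d1 ∈ p.map (fun y => y.1) := List.mem_map.2 ⟨_, hmem, rfl⟩
    have hx2 : x.2 + d2 ∈ p.map (fun y => y.2) := List.mem_map.2 ⟨_, hmem, rfl⟩
    have b1 := PySem.List.min?_isMin hmi _ hx1
    have b2 := PySem.List.max?_isMax hMa _ hx1
    have b3 := PySem.List.min?_isMin hmj _ hx2
    have b4 := PySem.List.max?_isMax hMj _ hx2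
    refine List.mem_product.2 ⟨(PySem.List.mem_pyRange_one).2 ⟨?_, ?_⟩,
      (PySem.List.mem_pyRange_one).2 ⟨?_, ?_⟩⟩ <;> simp only at b1 b2 b3 b4 <;> omega
  · -- every matching window's top-left corner was added to `seen`
    intro x hx
    obtain ⟨d1, d2, hd1, hd2, hmem⟩ := indP_exists p x.1 x.2 hx
    refine (mem_seenFold p _ x).2 (Or.inr ⟨(x.1 + d1, x.2 + d2), hmem, ?_⟩)
    rcases hd1 with rfl | rfl <;> rcases hd2 with rfl | rfl <;> simp [Prod.ext_iff]
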